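-- pv_equiv track=rewrite | github.com/amol-ship-it/agi-core | domains/arc/transformation_primitives.py | scale_up_2x
-- ===== SOURCE A (Python) =====
-- Grid = list[list[int]]
--
-- def scale_up_2x(grid: Grid) -> Grid:
--     """Scale grid 2x: each pixel becomes a 2x2 block."""
--     if not grid or not grid[0]:
--         return grid
--     result = []
--     for row in grid:
--         new_row = []
--         for v in row:
--             new_row.extend([v, v])
--         result.append(new_row)
--         result.append(new_row[:])
--     return result
-- ===== SOURCE B (Python) =====
-- def scale_up_2x(grid):
--     """Scale grid 2x: each pixel becomes a 2x2 block."""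
--     if not grid or not grid[0]:
--         return grid
--     return [[grid[i // 2][j // 2] for j in range(2 * len(grid[i // 2]))]
--             for i in range(2 * len(grid))]
-- ===== Notes on version B (the rewrite author's own statement) =====
-- stated objective: alternative
-- what changed: Replaces A's expand-and-duplicate construction (extend [v,v] into an accumulator row, append it and a copy) with a closed-form index mapping: each output cell (i,j) is computed directly as grid[i//2][j//2] over ranges of doubled indices, never building or copying intermediate rows.
import Mathlib
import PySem

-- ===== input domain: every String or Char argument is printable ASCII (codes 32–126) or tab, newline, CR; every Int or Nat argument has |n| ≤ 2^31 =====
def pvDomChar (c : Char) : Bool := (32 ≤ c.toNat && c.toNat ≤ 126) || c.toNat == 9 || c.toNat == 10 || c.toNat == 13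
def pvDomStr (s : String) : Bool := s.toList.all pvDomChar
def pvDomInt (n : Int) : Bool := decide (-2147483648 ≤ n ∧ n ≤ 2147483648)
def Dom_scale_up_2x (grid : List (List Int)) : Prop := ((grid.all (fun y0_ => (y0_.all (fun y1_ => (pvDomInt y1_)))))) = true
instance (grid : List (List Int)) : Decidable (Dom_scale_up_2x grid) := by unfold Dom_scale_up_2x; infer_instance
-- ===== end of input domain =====

-- ===== PORT A =====
-- B computes each output cell directly as grid[i//2][j//2] over doubled index ranges
-- instead of A's expand-and-duplicate row construction; return values agree, neither mutates.
def scale_up_2x (grid : List (List Int)) : List (List Int) :=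
  if grid = [] ∨ grid.headD [] = [] then grid
  else
    grid.foldl (fun result row =>
      let new_row := row.foldl (fun nr v => nr ++ [v, v]) []
      (result ++ [new_row]) ++ [new_row]) []

-- ===== PORT B =====
-- grid[i//2] and row[j//2]: the indices are always in range (0 ≤ i//2 < len grid),
-- so Python's grid[i//2] is exactly pyGetD with an unused default.
def scale_up_2x_alt (grid : List (List Int)) : List (List Int) :=
  if grid = [] ∨ grid.headD [] = [] then grid
  else
    (PySem.List.pyRange 0 (2 * (grid.length : Int)) 1).map (fun i =>
      let row := PySem.List.pyGetD grid (PySem.Int.floordiv i 2) []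
      (PySem.List.pyRange 0 (2 * (row.length : Int)) 1).map (fun j =>
        PySem.List.pyGetD row (PySem.Int.floordiv j 2) 0))

-- ===== PRECONDITION & SPEC =====
def Spec_scale_up_2x (grid : List (List Int)) (out : List (List Int)) : Prop := out = scale_up_2x_alt grid
instance (grid : List (List Int)) (out : List (List Int)) : Decidable (Spec_scale_up_2x grid out) := by unfold Spec_scale_up_2x; infer_instance

-- ===== CLAIM (what is proved, stated in full; the proofs are below) =====
def Claim_equal_scale_up_2x : Prop := ∀ (grid : List (List Int)), Dom_scale_up_2x grid → Spec_scale_up_2x grid (scale_up_2x grid)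

-- ===== LEMMAS AND PROOFS =====

lemma inner_foldl (row : List Int) (acc : List Int) :
    row.foldl (fun nr v => nr ++ [v, v]) acc = acc ++ row.flatMap (fun v => [v, v]) := by
  induction row generalizing acc with
  | nil => simp
  | cons h t ih => simp [List.foldl, ih, List.append_assoc]

lemma outer_foldl (grid : List (List Int)) (acc : List (List Int)) :
    grid.foldl (fun result row =>
      let new_row := row.foldl (fun nr v => nr ++ [v, v]) []
      (result ++ [new_row]) ++ [new_row]) acc
    = acc ++ grid.flatMap (fun row => [row.flatMap (fun v => [v, v]), row.flatMap (fun v => [v, v])]) := by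
  induction grid generalizing acc with
  | cons h t ih => rw [List.foldl_cons, ih, inner_foldl]; simp [List.append_assoc]
  | nil => simp

-- the closed-form index mapping over range(2n) equals duplication, for any per-element view h
lemma range_half {α : Type} (n : ℕ) (h : ℕ → α) :
    (List.range (2 * n)).map (fun k => h (k / 2)) = (List.range n).flatMap (fun k => [h k, h k]) := by
  induction n with
  | zero => simp
  | succ m ih =>
      have : 2 * (m + 1) = 2 * m + 1 + 1 := by ring
      rw [this, List.range_succ, List.range_succ, List.map_append, List.map_append, ih,
        List.range_succ, List.flatMap_append]
      have h1 : (2 * m) / 2 = m := by omega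
      have h2 : (2 * m + 1) / 2 = m := by omega
      simp [h1, h2]

lemma map_getD_range {α : Type} (xs : List α) (d : α) :
    (List.range xs.length).map (fun k => xs.getD k d) = xs := by
  apply List.ext_getElem
  · simp
  · intro i h1 h2
    simp [List.getD_eq_getElem?_getD, List.getElem?_eq_getElem h2]

-- B's doubled-index pass over a list equals duplication of a per-element view
lemma pass_eq {α : Type} {β : Type} (xs : List α) (g : α → β) (d : α) :
    (PySem.List.pyRange 0 (2 * (xs.length : Int)) 1).map
      (fun i => g (PySem.List.pyGetD xs (PySem.Int.floordiv i 2) d))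
    = xs.flatMap (fun x => [g x, g x]) := by
  rw [PySem.List.pyRange_one]
  have hcast : ((2 * (xs.length : Int) - 0).toNat) = 2 * xs.length := by omega
  rw [hcast, List.map_map]
  have hcg : ∀ k ∈ List.range (2 * xs.length),
      ((fun i => g (PySem.List.pyGetD xs (PySem.Int.floordiv i 2) d)) ∘ (fun k : ℕ => (0 : Int) + k)) k
      = (fun k : ℕ => g (xs.getD (k / 2) d)) k := by
    intro k hk
    simp only [Function.comp, zero_add]
    have h2 : PySem.Int.floordiv ((k : ℕ) : Int) 2 = (((k / 2 : ℕ)) : Int) := by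
      exact_mod_cast PySem.Int.floordiv_natCast k 2
    rw [h2, PySem.List.pyGetD_natCast]
  rw [List.map_congr_left hcg, range_half xs.length (fun k => g (xs.getD k d))]
  conv_rhs => rw [← map_getD_range xs d]
  rw [List.flatMap_map]

-- ===== VERDICT (by name: the statement is the Claim_ definition above) =====
theorem scale_up_2x_spec : Claim_equal_scale_up_2x := by
  intro grid _
  unfold Spec_scale_up_2x scale_up_2x scale_up_2x_alt
  split
  · rfl
  · rw [outer_foldl]
    simp only [List.nil_append]
    rw [pass_eq grid (fun row => (PySem.List.pyRange 0 (2 * (row.length : Int)) 1).map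
        (fun j => PySem.List.pyGetD row (PySem.Int.floordiv j 2) 0)) []]
    congr 1
    funext row
    have := pass_eq row id 0
    simp only [id] at this
    rw [← this]
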